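-- pv_equiv track=rewrite | github.com/jafaarIN/Projects | Auto_Suggestor/main.py | pairset
-- ===== SOURCE A (Python) =====
-- def pairset(words):
--     pairs = {}
--     currentPair = ()
--     currentIndex = 0
--
--     for word in words:
--         if currentIndex == 2:
--             pairs[(currentPair)] = 1
--             currentPair = ()
--             currentIndex = 0
--         currentPair += (word,)
--         currentIndex += 1
--     if len(currentPair) != 0:
--         pairs[(currentPair)] = 1
--     return pairs
-- ===== SOURCE B (Python) =====
-- def pairset(words):
--     lst = list(words)
--     chunks = []
--     i = 0
--     while i < len(lst):
--         chunks.append(tuple(lst[i:i+2]))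
--         i += 2
--     return dict.fromkeys(chunks, 1)
-- ===== Notes on version B (the rewrite author's own statement) =====
-- stated objective: simpler
-- what changed: B materializes the input and slices it into 2-chunks with an index-stepping while loop (lst[i:i+2], i += 2), then builds the dict in one dict.fromkeys call, instead of A's per-word running counter/tuple accumulator that flushes every two words.
import Mathlib
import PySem

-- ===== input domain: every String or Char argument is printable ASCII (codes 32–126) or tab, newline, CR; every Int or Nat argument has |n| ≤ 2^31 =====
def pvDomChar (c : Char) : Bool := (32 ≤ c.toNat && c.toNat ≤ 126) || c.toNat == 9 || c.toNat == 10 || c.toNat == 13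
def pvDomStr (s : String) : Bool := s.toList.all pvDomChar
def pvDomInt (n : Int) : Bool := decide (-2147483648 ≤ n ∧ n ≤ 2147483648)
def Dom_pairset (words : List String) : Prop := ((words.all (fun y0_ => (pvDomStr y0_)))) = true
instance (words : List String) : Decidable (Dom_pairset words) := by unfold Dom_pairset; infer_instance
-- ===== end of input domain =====

-- B slices the materialized list into 2-chunks by an index-stepping while loop and builds the
-- dict with one dict.fromkeys call, replacing A's running counter that flushes every two words (simpler).

-- ===== PORT A =====
-- one iteration of A's for-loop over (pairs, currentPair, currentIndex)
def pairsetStep (st : PySem.Dict (List String) Int × List String × Int) (word : String) :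
    PySem.Dict (List String) Int × List String × Int :=
  let (pairs, currentPair, currentIndex) := st
  let (pairs, currentPair, currentIndex) :=
    if currentIndex == 2 then (pairs.insert currentPair 1, ([] : List String), (0 : Int))
    else (pairs, currentPair, currentIndex)
  (pairs, currentPair ++ [word], currentIndex + 1)

def pairset (words : List String) : List (List String × Int) :=
  let st := words.foldl pairsetStep (PySem.Dict.empty, [], 0)
  let pairs := if st.2.1.length ≠ 0 then st.1.insert st.2.1 1 else st.1
  pairs.items

-- ===== PORT B =====
-- B's while loop: i steps by 2; each round appends lst[i:i+2]
def pairsetChunks (lst : List String) (i : Nat) : List (List String) :=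
  if i < lst.length then
    PySem.List.slice lst (some (i : Int)) (some ((i : Int) + 2)) :: pairsetChunks lst (i + 2)
  else []
termination_by lst.length - i
decreasing_by omega

def pairset_alt (words : List String) : List (List String × Int) :=
  ((pairsetChunks words 0).foldl (fun d c => d.insert c 1)
    (PySem.Dict.empty : PySem.Dict (List String) Int)).items

-- ===== PRECONDITION & SPEC =====
def Spec_pairset (words : List String) (out : List (List String × Int)) : Prop := out = pairset_alt words
instance (words : List String) (out : List (List String × Int)) : Decidable (Spec_pairset words out) := by unfold Spec_pairset; infer_instance

-- ===== CLAIM (what is proved, stated in full; the proofs are below) =====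
def Claim_equal_pairset : Prop := ∀ (words : List String), Dom_pairset words → Spec_pairset words (pairset words)

-- ===== LEMMAS AND PROOFS =====

-- proof-side structural form of the chunk list: cons-based grouping in twos
def chunksL : List String → List (List String)
  | [] => []
  | [a] => [[a]]
  | a :: b :: rest => [a, b] :: chunksL rest

-- B's index recursion computes the structural chunk list of the suffix lst.drop i
theorem pairsetChunks_eq_chunksL (lst : List String) (i : Nat) :
    pairsetChunks lst i = chunksL (lst.drop i) := by
  rw [pairsetChunks]
  split
  · rename_i h
    have hdrop : lst.drop i = lst[i] :: lst.drop (i + 1) := List.drop_eq_getElem_cons h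
    have hslice : PySem.List.slice lst (some (i : Int)) (some ((i : Int) + 2))
        = (lst.drop i).take 2 := by
      have := PySem.List.slice_natCast_add lst i 2
      simpa using this
    rw [pairsetChunks_eq_chunksL lst (i + 2), hslice, hdrop]
    by_cases h1 : i + 1 < lst.length
    · have hdrop1 : lst.drop (i + 1) = lst[i + 1] :: lst.drop (i + 2) :=
        List.drop_eq_getElem_cons h1
      rw [hdrop1]; simp [chunksL, List.take]
    · have : lst.drop (i + 1) = [] := List.drop_eq_nil_of_le (by omega)
      have h2 : lst.drop (i + 2) = [] := List.drop_eq_nil_of_le (by omega)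
      rw [this, h2]; simp [chunksL]
  · rename_i h
    have : lst.drop i = [] := List.drop_eq_nil_of_le (by omega)
    rw [this]; simp [chunksL]
termination_by lst.length - i
decreasing_by omega

-- A's loop with its final flush, started from an arbitrary dict, equals folding the chunks in.
theorem pairset_loop_eq (d : PySem.Dict (List String) Int) (l : List String) :
    (if (l.foldl pairsetStep (d, [], 0)).2.1.length ≠ 0
      then (l.foldl pairsetStep (d, [], 0)).1.insert (l.foldl pairsetStep (d, [], 0)).2.1 1
      else (l.foldl pairsetStep (d, [], 0)).1)
    = (chunksL l).foldl (fun d c => d.insert c 1) d := by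
  match l with
  | [] => simp [chunksL]
  | [a] => simp [chunksL, pairsetStep]
  | a :: b :: rest =>
    have ih := pairset_loop_eq (d.insert [a, b] 1) rest
    simp only [chunksL, List.foldl]
    rw [← ih]
    -- after the first two words the state is (d, [a, b], 2); if rest is nonempty its
    -- first iteration flushes, reaching the same state as starting from (d.insert [a,b] 1, [], 0)
    cases rest with
    | nil => simp [pairsetStep]
    | cons c rest' => simp [pairsetStep]
termination_by l.length
decreasing_by simp

-- ===== VERDICT (by name: the statement is the Claim_ definition above) =====
theorem pairset_spec : Claim_equal_pairset := by
  intro words _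
  show pairset words = pairset_alt words
  simp only [pairset, pairset_alt, pairsetChunks_eq_chunksL, List.drop_zero]
  exact congrArg PySem.Dict.items (pairset_loop_eq PySem.Dict.empty words)
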